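-- pv_equiv track=rewrite | github.com/wyhshines-boop/tab-icon | scripts/fetch_icon.py | sanitize_icon_key
-- ===== SOURCE A (Python) =====
-- def sanitize_icon_key(name: str) -> str:
--     cleaned = []
--     for char in name.strip():
--         if char.isalnum():
--             cleaned.append(char.lower())
--         elif char in {" ", "-", "_", "."}:
--             cleaned.append("-")
--
--     key = "".join(cleaned).strip("-")
--     while "--" in key:
--         key = key.replace("--", "-")
--     return key
-- ===== SOURCE B (Python) =====
-- def sanitize_icon_key(name: str) -> str:
--     tokens = []
--     cur = ""
--     for c in name.strip():
--         if c in " ._-":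
--             if cur:
--                 tokens.append(cur)
--                 cur = ""
--         elif c.isalnum():
--             cur += c.lower()
--     if cur:
--         tokens.append(cur)
--     return "-".join(tokens)
-- ===== Notes on version B (the rewrite author's own statement) =====
-- stated objective: simpler
-- what changed: A builds a cleaned character list and then post-processes the joined string (strips dashes at both ends, then a while-loop of full replace passes collapsing doubled dashes); B is a single pass that accumulates non-empty tokens and joins them with single dashes, so no stripping or collapse pass is needed.
import Mathlib
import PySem

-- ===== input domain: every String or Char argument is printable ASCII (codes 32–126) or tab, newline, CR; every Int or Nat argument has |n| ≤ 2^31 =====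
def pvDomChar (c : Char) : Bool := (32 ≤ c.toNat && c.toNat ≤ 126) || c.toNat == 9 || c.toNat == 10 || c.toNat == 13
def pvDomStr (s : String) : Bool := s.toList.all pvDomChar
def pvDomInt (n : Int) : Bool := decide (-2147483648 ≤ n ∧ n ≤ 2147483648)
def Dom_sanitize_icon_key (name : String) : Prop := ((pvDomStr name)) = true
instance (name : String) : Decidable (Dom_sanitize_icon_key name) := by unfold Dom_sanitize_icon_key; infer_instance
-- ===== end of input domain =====

-- B replaces A's build-then-postprocess pipeline (strip('-') + while-replace collapse) by a single
-- pass that accumulates tokens and joins them with '-'; objective: simpler, same asymptotic cost.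

-- ===== PORT A =====
-- `while "--" in key: key = key.replace("--", "-")`: each replace strictly shortens `key` when
-- "--" occurs, so `key.length` steps of fuel always suffice (the fuel only makes the loop total).
def pvCollapseA : Nat → List Char → List Char
  | 0, k => k
  | fuel+1, k =>
    if PySem.Chars.isIn ['-', '-'] k then
      pvCollapseA fuel (PySem.Chars.replace k ['-', '-'] ['-'])
    else k

def sanitize_icon_key (name : String) : String :=
  let cleaned : List Char :=
    (PySem.Str.strip name).toList.foldl (fun acc char =>
      if PySem.Chars.isalnum char then acc ++ [PySem.Chars.lowerChar char]
      else if char == ' ' || char == '-' || char == '_' || char == '.' then acc ++ ['-']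
      else acc) []
  let key : List Char := PySem.Chars.stripChars cleaned ['-']
  String.mk (pvCollapseA key.length key)

-- ===== PORT B =====
-- `if cur: tokens.append(cur); cur = ""`
def pvFlush (st : List (List Char) × List Char) : List (List Char) :=
  if st.2.isEmpty then st.1 else st.1 ++ [st.2]

def sanitize_icon_key_alt (name : String) : String :=
  let st :=
    (PySem.Str.strip name).toList.foldl (fun (st : List (List Char) × List Char) c =>
      if c == ' ' || c == '.' || c == '_' || c == '-' then (pvFlush st, [])
      else if PySem.Chars.isalnum c then (st.1, st.2 ++ [PySem.Chars.lowerChar c])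
      else st) ([], [])
  String.mk (PySem.Chars.join ['-'] (pvFlush st))

-- ===== PRECONDITION & SPEC =====
def Spec_sanitize_icon_key (name : String) (out : String) : Prop := out = sanitize_icon_key_alt name
instance (name : String) (out : String) : Decidable (Spec_sanitize_icon_key name out) := by unfold Spec_sanitize_icon_key; infer_instance

-- ===== CLAIM (what is proved, stated in full; the proofs are below) =====
def Claim_equal_sanitize_icon_key : Prop := ∀ (name : String), Dom_sanitize_icon_key name → Spec_sanitize_icon_key name (sanitize_icon_key name)

-- ===== LEMMAS AND PROOFS =====

theorem pvCharLe {c d : Char} (h : c ≤ d) : c.toNat ≤ d.toNat := Fin.mk_le_mk.mp h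

-- A's per-char cleaning, written as a structural recursion.
def pvClean : List Char → List Char
  | [] => []
  | c :: t =>
    if PySem.Chars.isalnum c then PySem.Chars.lowerChar c :: pvClean t
    else if c == ' ' || c == '-' || c == '_' || c == '.' then '-' :: pvClean t
    else pvClean t

-- B's loop step, on the cleaned alphabet (every char is '-' or a kept token char).
def pvStep (st : List (List Char) × List Char) (c : Char) : List (List Char) × List Char :=
  if c == '-' then (pvFlush st, []) else (st.1, st.2 ++ [c])

-- one parallel pass of `key.replace("--", "-")`
def pvRep1 : List Char → List Char
  | [] => []
  | '-' :: '-' :: t => '-' :: pvRep1 t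
  | c :: t => c :: pvRep1 t

-- "--" occurs in v
def pvHasDD : List Char → Bool
  | [] => false
  | [_] => false
  | a :: b :: t => (a == '-' && b == '-') || pvHasDD (b :: t)

def pvToks (v : List Char) : List (List Char) := pvFlush (v.foldl pvStep ([], []))

theorem pvClean_foldl (l : List Char) (acc : List Char) :
    l.foldl (fun acc char =>
      if PySem.Chars.isalnum char then acc ++ [PySem.Chars.lowerChar char]
      else if char == ' ' || char == '-' || char == '_' || char == '.' then acc ++ ['-']
      else acc) acc = acc ++ pvClean l := by
  induction l generalizing acc with
  | nil => simp [pvClean]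
  | cons c t ih =>
    simp only [List.foldl_cons]
    rw [ih]
    by_cases h1 : PySem.Chars.isalnum c = true
    · simp [pvClean, h1]
    · by_cases h2 : (c == ' ' || c == '-' || c == '_' || c == '.') = true
      · simp [pvClean, h1, h2]
      · simp [pvClean, h1, h2]

theorem pvAlnum_not_sep (c : Char) (h : PySem.Chars.isalnum c = true) :
    (c == ' ' || c == '-' || c == '_' || c == '.') = false := by
  simp only [Bool.or_eq_false_iff, beq_eq_false_iff_ne]
  refine ⟨⟨⟨?_, ?_⟩, ?_⟩, ?_⟩ <;> rintro rfl <;> exact absurd h (by decide)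

theorem pvAlnum_lower_ne_dash (c : Char) (h : PySem.Chars.isalnum c = true) :
    PySem.Chars.lowerChar c ≠ '-' := by
  simp only [PySem.Chars.isalnum, PySem.Chars.isalpha, PySem.Chars.isdigit,
    PySem.Chars.isupper, PySem.Chars.islower, Bool.or_eq_true, Bool.and_eq_true,
    decide_eq_true_eq] at h
  unfold PySem.Chars.lowerChar
  split
  · rename_i hu
    simp only [PySem.Chars.isupper, Bool.and_eq_true, decide_eq_true_eq] at hu
    have h1 : 65 ≤ c.toNat := pvCharLe hu.1
    have h2 : c.toNat ≤ 90 := pvCharLe hu.2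
    intro he
    have h3 : (Char.ofNat (c.toNat + 32)).toNat = 45 := by rw [he]; decide
    rw [Char.toNat_ofNat, if_pos (Or.inl (by omega))] at h3
    omega
  · rename_i hu
    intro he; subst he
    rcases h with (h | h) | h
    · exact absurd h (by decide)
    · exact absurd (pvCharLe h.1) (by decide)
    · exact absurd (pvCharLe h.1) (by decide)

theorem pvSep_comm (c : Char) :
    (c == ' ' || c == '.' || c == '_' || c == '-') = (c == ' ' || c == '-' || c == '_' || c == '.') := by
  simp [Bool.or_comm, Bool.or_left_comm, Bool.or_assoc]

-- B's three-way loop over s = B's two-way loop over the cleaned list.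
theorem pvB_foldl (l : List Char) (st : List (List Char) × List Char) :
    l.foldl (fun (st : List (List Char) × List Char) c =>
      if c == ' ' || c == '.' || c == '_' || c == '-' then (pvFlush st, [])
      else if PySem.Chars.isalnum c then (st.1, st.2 ++ [PySem.Chars.lowerChar c])
      else st) st = (pvClean l).foldl pvStep st := by
  induction l generalizing st with
  | nil => simp [pvClean]
  | cons c t ih =>
    simp only [List.foldl_cons]
    rw [ih]
    by_cases h1 : PySem.Chars.isalnum c = true
    · have hs := pvAlnum_not_sep c h1
      have hd := pvAlnum_lower_ne_dash c h1
      simp only [pvClean, h1, if_true, List.foldl_cons]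
      congr 1
      simp [pvSep_comm c, hs, pvStep, hd]
    · by_cases h2 : (c == ' ' || c == '-' || c == '_' || c == '.') = true
      · simp only [pvClean, h1, h2, Bool.false_eq_true, if_false, if_true, List.foldl_cons]
        congr 1
        simp [pvSep_comm c, h2, pvStep]
      · simp only [pvClean, h1, h2, Bool.false_eq_true, if_false]
        congr 1
        simp [pvSep_comm c, h2]

-- ----- the replace "--" -> "-" pass -----

theorem pvRep1_single (c : Char) : pvRep1 [c] = [c] := by
  rw [pvRep1.eq_def]; split <;> simp_all [pvRep1]

theorem pvRep1_cons (c d : Char) (t : List Char) (h : ¬(c = '-' ∧ d = '-')) :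
    pvRep1 (c :: d :: t) = c :: pvRep1 (d :: t) := by
  rw [pvRep1.eq_def]
  split <;> simp_all

theorem pvReplace_go (fuel : Nat) : ∀ (l acc : List Char), l.length ≤ fuel →
    PySem.Chars.replace.go ['-', '-'] ['-'] fuel l acc = acc.reverse ++ pvRep1 l := by
  induction fuel with
  | zero =>
    intro l acc h
    have : l = [] := List.eq_nil_of_length_eq_zero (Nat.le_zero.mp h)
    subst this
    simp [PySem.Chars.replace.go, pvRep1]
  | succ n ih =>
    intro l acc h
    match l with
    | [] => simp [PySem.Chars.replace.go, pvRep1]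
    | [c] =>
      rw [PySem.Chars.replace.go]
      rw [if_neg (by simp [List.isPrefixOf])]
      rw [ih [] (c :: acc) (by simp)]
      simp [pvRep1_single, pvRep1]
    | c :: d :: t =>
      rw [PySem.Chars.replace.go]
      by_cases hp : c = '-' ∧ d = '-'
      · obtain ⟨rfl, rfl⟩ := hp
        rw [if_pos (by simp [List.isPrefixOf])]
        rw [show List.drop ['-', '-'].length ('-' :: '-' :: t) = t from rfl]
        rw [ih t (['-'].reverse ++ acc) (by simp at h ⊢; omega)]
        simp [pvRep1]
      · rw [if_neg (by simpa [List.isPrefixOf, Bool.and_eq_true, beq_iff_eq, and_assoc] using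
          fun h1 h2 => hp ⟨h1.symm, h2.symm⟩)]
        rw [ih (d :: t) (c :: acc) (by simp at h ⊢; omega)]
        rw [pvRep1_cons c d t hp]
        simp

theorem pvReplace_eq_rep1 (v : List Char) :
    PySem.Chars.replace v ['-', '-'] ['-'] = pvRep1 v := by
  rw [PySem.Chars.replace]
  rw [if_neg (by simp)]
  simpa using pvReplace_go v.length v [] le_rfl

-- ----- "--" occurrence -----

theorem pvHasDD_iff (v : List Char) : pvHasDD v = true ↔ ['-', '-'] <:+: v := by
  induction v with
  | nil => simp [pvHasDD]
  | cons c t ih =>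
    match t with
    | [] =>
      simp only [pvHasDD, Bool.false_eq_true, false_iff]
      intro hinf
      have := hinf.length_le
      simp at this
    | d :: t' =>
      rw [pvHasDD, List.infix_cons_iff]
      simp only [Bool.or_eq_true, Bool.and_eq_true, beq_iff_eq, ih]
      constructor
      · rintro (⟨rfl, rfl⟩ | h)
        · exact Or.inl ⟨t', by simp⟩
        · exact Or.inr h
      · rintro (⟨r, hr⟩ | h)
        · obtain ⟨h1, h2, h3⟩ : '-' = c ∧ '-' = d ∧ r = t' := by simpa using hr
          exact Or.inl ⟨h1.symm, h2.symm⟩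
        · exact Or.inr h

theorem pvRep1_length_le (v : List Char) : (pvRep1 v).length ≤ v.length := by
  induction v using pvRep1.induct with
  | case1 => simp [pvRep1]
  | case2 t ih => simp only [pvRep1, List.length_cons]; omega
  | case3 c t h ih =>
    match t, h with
    | [], _ => simp [pvRep1_single]
    | d :: t', h =>
      have hne : ¬(c = '-' ∧ d = '-') := by
        intro ⟨h1, h2⟩; exact h t' h1 (by rw [h2])
      rw [pvRep1_cons c d t' hne]
      simpa using ih

theorem pvRep1_length_lt (v : List Char) (h : pvHasDD v = true) :
    (pvRep1 v).length < v.length := by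
  induction v using pvRep1.induct with
  | case1 => simp [pvHasDD] at h
  | case2 t ih =>
    have := pvRep1_length_le t
    simp only [pvRep1, List.length_cons]
    omega
  | case3 c t hh ih =>
    match t, hh with
    | [], _ => simp [pvHasDD] at h
    | d :: t', hh =>
      have hne : ¬(c = '-' ∧ d = '-') := by
        intro ⟨h1, h2⟩; exact hh t' h1 (by rw [h2])
      rw [pvRep1_cons c d t' hne]
      have hdd : pvHasDD (d :: t') = true := by
        rw [pvHasDD] at h
        simp only [Bool.or_eq_true, Bool.and_eq_true, beq_iff_eq] at h
        rcases h with ⟨h1, h2⟩ | h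
        · exact absurd ⟨h1, h2⟩ hne
        · exact h
      simpa using ih hdd

theorem pvRep1_ne_nil (v : List Char) (h : v ≠ []) : pvRep1 v ≠ [] := by
  match v with
  | [] => exact absurd rfl h
  | [c] => simp [pvRep1_single]
  | c :: d :: t =>
    by_cases hp : c = '-' ∧ d = '-'
    · obtain ⟨rfl, rfl⟩ := hp; simp [pvRep1]
    · rw [pvRep1_cons c d t hp]; simp

theorem pvRep1_head (v : List Char) (h : v.head? ≠ some '-') :
    (pvRep1 v).head? = v.head? := by
  match v with
  | [] => rfl
  | [c] => simp [pvRep1_single]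
  | c :: d :: t =>
    have hc : c ≠ '-' := by simpa using h
    rw [pvRep1_cons c d t (by tauto)]
    simp

theorem pvGetLast?_cons_ne_nil (a : Char) (l : List Char) (h : l ≠ []) :
    (a :: l).getLast? = l.getLast? := by
  cases l with
  | nil => exact absurd rfl h
  | cons b t => simp [List.getLast?_cons_cons]

theorem pvRep1_last (v : List Char) (h : v.getLast? ≠ some '-') :
    (pvRep1 v).getLast? = v.getLast? := by
  induction v using pvRep1.induct with
  | case1 => rfl
  | case2 t ih =>
    match t with
    | [] => simp at h
    | e :: t' =>
      have ht : (e :: t').getLast? ≠ some '-' := by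
        simpa [List.getLast?_cons_cons] using h
      rw [pvRep1]
      have hne := pvRep1_ne_nil (e :: t') (by simp)
      rw [pvGetLast?_cons_ne_nil _ _ hne, ih ht]
      rw [show ('-' :: '-' :: e :: t').getLast? = (e :: t').getLast? by
        simp [List.getLast?_cons_cons]]
  | case3 c t hh ih =>
    match t, hh with
    | [], _ => simp [pvRep1_single]
    | d :: t', hh =>
      have hne : ¬(c = '-' ∧ d = '-') := by
        intro ⟨h1, h2⟩; exact hh t' h1 (by rw [h2])
      rw [pvRep1_cons c d t' hne]
      have ht : (d :: t').getLast? ≠ some '-' := by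
        simpa [List.getLast?_cons_cons] using h
      have hne2 := pvRep1_ne_nil (d :: t') (by simp)
      rw [pvGetLast?_cons_ne_nil _ _ hne2, ih ht]
      simp [List.getLast?_cons_cons]

-- ----- B's token loop -----

theorem pvFlush_append (acc : List (List Char)) (st : List (List Char) × List Char) :
    pvFlush (acc ++ st.1, st.2) = acc ++ pvFlush st := by
  unfold pvFlush; split <;> simp_all

theorem pvStep_dash_dash (st : List (List Char) × List Char) :
    pvStep (pvStep st '-') '-' = pvStep st '-' := by
  simp [pvStep, pvFlush]

theorem pvFoldl_step_acc (v : List Char) : ∀ (acc : List (List Char)) (cur : List Char),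
    v.foldl pvStep (acc, cur) = (acc ++ (v.foldl pvStep ([], cur)).1, (v.foldl pvStep ([], cur)).2) := by
  induction v with
  | nil => intro acc cur; simp
  | cons c t ih =>
    intro acc cur
    simp only [List.foldl_cons]
    by_cases hc : (c == '-') = true
    · rw [show pvStep (acc, cur) c = (pvFlush (acc, cur), []) from by simp [pvStep, hc]]
      rw [show pvStep ([], cur) c = (pvFlush ([], cur), []) from by simp [pvStep, hc]]
      rw [ih (pvFlush (acc, cur)) [], ih (pvFlush ([], cur)) []]
      have h2 : pvFlush (acc, cur) = acc ++ pvFlush ([], cur) := by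
        simpa using pvFlush_append acc ([], cur)
      rw [h2, List.append_assoc]
    · rw [show pvStep (acc, cur) c = (acc, cur ++ [c]) from by simp [pvStep, hc]]
      rw [show pvStep ([], cur) c = ([], cur ++ [c]) from by simp [pvStep, hc]]
      exact ih acc (cur ++ [c])

theorem pvStep_dashes_right (d : List Char) : ∀ (st : List (List Char) × List Char),
    (∀ c ∈ d, c = '-') → pvFlush (d.foldl pvStep st) = pvFlush st := by
  induction d with
  | nil => intro st _; rfl
  | cons c t ih =>
    intro st hd
    have hc : c = '-' := hd c (by simp)
    simp only [List.foldl_cons]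
    rw [show pvStep st c = (pvFlush st, []) from by simp [pvStep, hc]]
    rw [ih (pvFlush st, []) (fun x hx => hd x (by simp [hx]))]
    simp [pvFlush]

theorem pvStep_dashes_left (d : List Char) : ∀ (acc : List (List Char)),
    (∀ c ∈ d, c = '-') → d.foldl pvStep (acc, []) = (acc, []) := by
  induction d with
  | nil => intro acc _; rfl
  | cons c t ih =>
    intro acc hd
    have hc : c = '-' := hd c (by simp)
    simp only [List.foldl_cons]
    rw [show pvStep (acc, []) c = (acc, []) from by simp [pvStep, hc, pvFlush]]
    exact ih acc (fun x hx => hd x (by simp [hx]))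

theorem pvToks_rep1 (v : List Char) : ∀ (st : List (List Char) × List Char),
    pvFlush ((pvRep1 v).foldl pvStep st) = pvFlush (v.foldl pvStep st) := by
  induction v using pvRep1.induct with
  | case1 => intro st; rfl
  | case2 t ih =>
    intro st
    rw [show pvRep1 ('-' :: '-' :: t) = '-' :: pvRep1 t from rfl]
    simp only [List.foldl_cons]
    rw [ih (pvStep st '-'), pvStep_dash_dash]
  | case3 c t hh ih =>
    intro st
    match t, hh with
    | [], _ =>
      rw [pvRep1_single]
    | d :: t', hh =>
      have hne : ¬(c = '-' ∧ d = '-') := by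
        intro ⟨h1, h2⟩; exact hh t' h1 (by rw [h2])
      rw [pvRep1_cons c d t' hne]
      simp only [List.foldl_cons]
      exact ih (pvStep st c)

-- join with '-' of a cons
theorem pvJoin_cons (x : List Char) (xs : List (List Char)) :
    PySem.Chars.join ['-'] (x :: xs) =
      x ++ (if xs = [] then [] else '-' :: PySem.Chars.join ['-'] xs) := by
  cases xs with
  | nil => simp [PySem.Chars.join, List.intercalate, List.intersperse]
  | cons y ys =>
    simp only [if_neg (List.cons_ne_nil y ys), PySem.Chars.join]
    simp [List.intercalate]

theorem pvJoin_nil : PySem.Chars.join ['-'] [] = [] := by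
  simp [PySem.Chars.join, List.intercalate]

-- join recovers the input when it has no "--", no trailing '-', and (cur ≠ [] or no leading '-')
theorem pvT (v : List Char) : ∀ (cur : List Char), pvHasDD v = false →
    v.getLast? ≠ some '-' → (cur ≠ [] ∨ v.head? ≠ some '-') →
    PySem.Chars.join ['-'] (pvFlush (v.foldl pvStep ([], cur))) = cur ++ v := by
  induction v with
  | nil =>
    intro cur _ _ _
    by_cases h : cur = []
    · simp [h, pvFlush]
    · simp only [List.foldl_nil, pvFlush]
      rw [if_neg (by simpa using h)]
      rw [List.nil_append, pvJoin_cons]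
      simp
  | cons c t ih =>
    intro cur hdd hlast hside
    by_cases hc : c = '-'
    · subst hc
      have hcur : cur ≠ [] := by
        rcases hside with h | h
        · exact h
        · simp at h
      have ht_ne : t ≠ [] := by rintro rfl; simp at hlast
      have hth : t.head? ≠ some '-' := by
        cases t with
        | nil => simp
        | cons e t' =>
          rw [pvHasDD] at hdd
          simp only [Bool.or_eq_false_iff, Bool.and_eq_false_iff, beq_eq_false_iff_ne] at hdd
          rcases hdd.1 with h | h
          · exact absurd rfl h
          · simpa using h
      have hdd_t : pvHasDD t = false := by
        cases t with
        | nil => rfl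
        | cons e t' =>
          rw [pvHasDD] at hdd
          simp only [Bool.or_eq_false_iff] at hdd
          exact hdd.2
      have hlast_t : t.getLast? ≠ some '-' := by
        rwa [pvGetLast?_cons_ne_nil '-' t ht_ne] at hlast
      simp only [List.foldl_cons]
      rw [show pvStep ([], cur) '-' = ([cur], []) from by
        simp [pvStep, pvFlush, hcur]]
      rw [pvFoldl_step_acc t [cur] []]
      rw [show ([cur] ++ (t.foldl pvStep ([], [])).1, (t.foldl pvStep ([], [])).2) =
            ([cur] ++ (t.foldl pvStep ([], [])).1, (t.foldl pvStep ([], ([] : List Char))).2) from rfl]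
      rw [pvFlush_append [cur] (t.foldl pvStep ([], []))]
      have hrec := ih [] hdd_t hlast_t (Or.inr hth)
      simp only [List.nil_append] at hrec
      have htoks_ne : pvFlush (t.foldl pvStep ([], [])) ≠ [] := by
        intro h0
        rw [h0, pvJoin_nil] at hrec
        exact ht_ne hrec.symm
      rw [List.singleton_append, pvJoin_cons cur _, if_neg htoks_ne, hrec]
    · simp only [List.foldl_cons]
      rw [show pvStep ([], cur) c = ([], cur ++ [c]) from by simp [pvStep, hc]]
      cases t with
      | nil =>
        simp only [List.foldl_nil, pvFlush]
        rw [if_neg (by simp)]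
        rw [List.nil_append, pvJoin_cons]
        simp
      | cons d t' =>
        have hdd_t : pvHasDD (d :: t') = false := by
          rw [pvHasDD] at hdd
          simp only [Bool.or_eq_false_iff] at hdd
          exact hdd.2
        have hlast_t : (d :: t').getLast? ≠ some '-' := by
          rwa [pvGetLast?_cons_ne_nil c (d :: t') (by simp)] at hlast
        have := ih (cur ++ [c]) hdd_t hlast_t (Or.inl (by simp))
        rw [this]
        simp

-- ----- the while loop -----

theorem pvToks_nil : pvToks [] = [] := rfl

theorem pvCollapse_toks (fuel : Nat) : ∀ (key : List Char), key.length ≤ fuel →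
    key.head? ≠ some '-' → key.getLast? ≠ some '-' →
    pvCollapseA fuel key = PySem.Chars.join ['-'] (pvToks key) := by
  induction fuel with
  | zero =>
    intro key h _ _
    have : key = [] := List.eq_nil_of_length_eq_zero (Nat.le_zero.mp h)
    subst this
    rw [pvToks_nil, pvJoin_nil]
    rfl
  | succ n ih =>
    intro key h hhead hlast
    rw [pvCollapseA]
    by_cases hin : PySem.Chars.isIn ['-', '-'] key = true
    · rw [if_pos hin]
      have hdd : pvHasDD key = true :=
        (pvHasDD_iff key).mpr ((PySem.Chars.isIn_iff_infix _ _).mp hin)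
      have hne : key ≠ [] := by rintro rfl; simp [pvHasDD] at hdd
      rw [pvReplace_eq_rep1 key]
      have hlen : (pvRep1 key).length < key.length := pvRep1_length_lt key hdd
      have hh2 : (pvRep1 key).head? ≠ some '-' := by rw [pvRep1_head key hhead]; exact hhead
      have hl2 : (pvRep1 key).getLast? ≠ some '-' := by rw [pvRep1_last key hlast]; exact hlast
      rw [ih (pvRep1 key) (by omega) hh2 hl2]
      unfold pvToks
      rw [pvToks_rep1 key ([], [])]
    · rw [if_neg hin]
      have hdd : pvHasDD key = false := by
        rcases Bool.eq_false_or_eq_true (pvHasDD key) with h0 | h0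
        · exact absurd ((PySem.Chars.isIn_iff_infix _ _).mpr ((pvHasDD_iff key).mp h0)) hin
        · exact h0
      have := pvT key [] hdd hlast (Or.inr hhead)
      simp only [List.nil_append] at this
      exact this.symm

-- ----- stripping dashes does not change the tokens -----

theorem pvDashContains (c : Char) : (['-'].contains c = true) ↔ c = '-' := by
  simp

theorem pvToks_stripChars (w : List Char) :
    pvToks (PySem.Chars.stripChars w ['-']) = pvToks w := by
  simp only [PySem.Chars.stripChars]
  have hpc : ∀ c : Char, (['-'].contains c) = true → c = '-' :=
    fun c hc => (pvDashContains c).mp hc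
  have h1 : pvToks w = pvToks (List.dropWhile (fun c => ['-'].contains c) w) := by
    unfold pvToks
    conv_lhs => rw [← List.takeWhile_append_dropWhile (p := fun c => ['-'].contains c) (l := w)]
    rw [List.foldl_append]
    rw [pvStep_dashes_left _ [] (fun x hx => hpc x (List.mem_takeWhile_imp hx))]
  set u := List.dropWhile (fun c => ['-'].contains c) w with hu
  have h2 : u = (List.dropWhile (fun c => ['-'].contains c) u.reverse).reverse ++
      (List.takeWhile (fun c => ['-'].contains c) u.reverse).reverse := by
    rw [← List.reverse_append, List.takeWhile_append_dropWhile, List.reverse_reverse]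
  rw [h1]
  conv_rhs => rw [h2]
  unfold pvToks
  rw [List.foldl_append]
  rw [pvStep_dashes_right _ _
    (fun x hx => hpc x (List.mem_takeWhile_imp (List.mem_reverse.mp hx)))]

theorem pvDropWhile_head (l : List Char) :
    (List.dropWhile (fun c => ['-'].contains c) l).head? ≠ some '-' := by
  have h := List.head?_dropWhile_not (fun c => ['-'].contains c) l
  cases hh : (List.dropWhile (fun c => ['-'].contains c) l).head? with
  | none => simp
  | some x =>
    rw [hh] at h
    intro hcontr
    have hx : x = '-' := by injection hcontr
    subst hx
    simp at h

theorem pvStrip_last (w : List Char) :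
    (PySem.Chars.stripChars w ['-']).getLast? ≠ some '-' := by
  simp only [PySem.Chars.stripChars]
  rw [List.getLast?_reverse]
  exact pvDropWhile_head _

theorem pvStrip_head (w : List Char) :
    (PySem.Chars.stripChars w ['-']).head? ≠ some '-' := by
  simp only [PySem.Chars.stripChars]
  rw [List.head?_reverse]
  set u := List.dropWhile (fun c => ['-'].contains c) w with hu
  by_cases hr : List.dropWhile (fun c => ['-'].contains c) u.reverse = []
  · rw [hr]; simp
  · obtain ⟨pre, hpre⟩ := List.dropWhile_suffix (l := u.reverse) (fun c => ['-'].contains c)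
    rw [show (List.dropWhile (fun c => ['-'].contains c) u.reverse).getLast? = u.reverse.getLast? by
      conv_rhs => rw [← hpre]
      exact (List.getLast?_append_of_ne_nil pre hr).symm]
    rw [List.getLast?_reverse]
    exact pvDropWhile_head w

-- ===== VERDICT (by name: the statement is the Claim_ definition above) =====
theorem sanitize_icon_key_spec : Claim_equal_sanitize_icon_key := by
  unfold Claim_equal_sanitize_icon_key
  intro name _
  unfold Spec_sanitize_icon_key
  simp only [sanitize_icon_key, sanitize_icon_key_alt]
  rw [pvClean_foldl, pvB_foldl]
  rw [List.nil_append]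
  set w := pvClean (PySem.Str.strip name).toList with hw
  set key := PySem.Chars.stripChars w ['-'] with hkey
  rw [pvCollapse_toks key.length key le_rfl (pvStrip_head w) (pvStrip_last w)]
  rw [pvToks_stripChars w]
  rfl
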